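-- pv_equiv track=rewrite | github.com/Mr-Perfection/coding_practice | Python/Reals/star/problem3.py | solution
-- ===== SOURCE A (Python) =====
-- def solution(A, B, M, X, Y):
--     # write your code in Python 2.7
--     """
--     floors = [0 to M ]
--     elevator:
--         max capacity of X people
--         weight limit of Y lbs
--     N people gathered in floor[0] standing in a queue()
--     k: a kth numbered person
--     A[k] = weight, B[k] = target floor or dst ex)A[0] and B[0] => 0th person
--
--     count total number of times that elavator stops
--
--     ex1)
--     floors = [] * 6 (o to M=5)
--     elavator:
--         X = 2, Y = 200
--     People:
--         A = [60,80,40]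
--         B = [2,3,5]
--         queue = [(a1,b1)...(an,bn)]
--         queue = [(60,2), (80,3),(40,5)]
--
--     my approach#1:
--     * stops = 0
--     * while queue is not empty
--         * people = X ex) X = 2
--         * elevator = [], weight = 0
--         * while queue and people > 0 and weight <= Y
--             values = queue.pop()
--             elevator.push(values)
--             weight += values[0]
--             people -= 1
--         * while elavator is not empty
--             * values = elavator.dequeue()
--             * while elavator and elavator.first[1] == values[1]
--                 * elavator.dequeue()
--             stops += 1
--         * stops += 1
--     Time: O(N * M)?
--     Space: O(M + N)
--
--     """
--     # assumed that all the inputs are valid and exist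
--     stops = 0
--     queue = []
--     N,i = len(A),0
--
--     # add to queue (A[i],B[i])...
--     while i < N:
--         queue.append((A[i],B[i]))
--         i += 1
--
--     # while queue is not empty
--     while queue:
--         # intializations
--         # max capacity of people &  weight
--         people,weight = X,Y
--         elevator = []
--
--         while queue and people and weight > 0:
--             values = queue[0]
--             weight -= values[0]
--             if weight < 0: break
--             elevator.append(values)
--             queue.pop(0)
--             people -= 1
--         # making stops for people inside the elevator
--         # keep checking the next passenger is also at the same target floor as current pass.
--         # if true, let them exit from elevator
--         while elevator:
--             values = elevator.pop(0)
--             while elevator and elevator[0][1] == values[1]: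
--                 elevator.pop(0)
--             stops += 1
--         stops += 1 # ending at ground level
--     return stops
-- ===== SOURCE B (Python) =====
-- def solution(A, B, M, X, Y):
--     # Single-pass batch loop: count floor-runs while loading (no elevator list,
--     # no second scan). Loading conditions identical to A's.
--     stops = 0
--     queue = [(A[i], B[i]) for i in range(len(A))]
--     while queue:
--         people, weight = X, Y
--         loaded_any = False
--         prev_floor = None
--         while queue and people and weight > 0:
--             w, f = queue[0]
--             weight -= w
--             if weight < 0:
--                 break
--             if not loaded_any or f != prev_floor:
--                 stops += 1
--                 prev_floor = f
--                 loaded_any = True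
--             queue.pop(0)
--             people -= 1
--         stops += 1
--     return stops
-- ===== Notes on version B (the rewrite author's own statement) =====
-- stated objective: simpler
-- what changed: B drops the elevator list and the separate pop-while scan: it counts floor-runs in a single pass during loading using a loaded_any flag and prev_floor, keeping A's exact loading conditions.
import Mathlib
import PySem

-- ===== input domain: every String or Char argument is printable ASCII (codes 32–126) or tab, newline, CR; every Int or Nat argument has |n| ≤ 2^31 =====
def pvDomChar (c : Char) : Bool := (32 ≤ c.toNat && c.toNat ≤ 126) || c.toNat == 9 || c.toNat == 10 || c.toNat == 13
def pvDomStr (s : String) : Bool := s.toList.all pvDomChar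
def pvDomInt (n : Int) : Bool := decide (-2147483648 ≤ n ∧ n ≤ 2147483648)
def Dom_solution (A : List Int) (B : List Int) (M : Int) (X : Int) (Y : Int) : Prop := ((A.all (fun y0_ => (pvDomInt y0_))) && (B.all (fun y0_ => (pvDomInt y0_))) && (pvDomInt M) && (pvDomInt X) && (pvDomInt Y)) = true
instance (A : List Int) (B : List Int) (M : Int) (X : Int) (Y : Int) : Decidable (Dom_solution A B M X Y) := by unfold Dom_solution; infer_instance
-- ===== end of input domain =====

-- B replaces A's build-an-elevator-list-then-scan-it-for-runs structure by a single
-- loading pass that counts floor-runs on the fly (objective: simpler).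

-- ===== PORT A =====

-- inner while: elevator[0] popped, then pop while same target floor
def skipSameA (f : Int) : List (Int × Int) → List (Int × Int)
  | [] => []
  | u :: e => if u.2 = f then skipSameA f e else u :: e

theorem skipSameA_length_le (f : Int) (e : List (Int × Int)) :
    (skipSameA f e).length ≤ e.length := by
  induction e with
  | nil => simp [skipSameA]
  | cons u e ih =>
    simp only [skipSameA]
    split
    · exact Nat.le_succ_of_le ih
    · simp

-- second while loop of A: one stop per run of equal consecutive target floors
def runsA : List (Int × Int) → Int
  | [] => 0
  | v :: e => runsA (skipSameA v.2 e) + 1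
termination_by l => l.length
decreasing_by simpa using Nat.lt_succ_of_le (skipSameA_length_le v.2 e)

-- loading while loop of A: returns (elevator, remaining queue)
def loadA : List (Int × Int) → Int → Int → List (Int × Int) × List (Int × Int)
  | [], _, _ => ([], [])
  | v :: q, people, weight =>
    if people = 0 ∨ weight ≤ 0 then ([], v :: q)
    else
      let w' := weight - v.1
      if w' < 0 then ([], v :: q)
      else
        let r := loadA q (people - 1) w'
        (v :: r.1, r.2)

-- outer while loop of A; under Pre_solution each batch removes at least one person,
-- so fuel = number of people suffices (fuel only makes the recursion total)
def outerA (X Y : Int) : Nat → List (Int × Int) → Int → Int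
  | _, [], stops => stops
  | 0, _ :: _, stops => stops
  | fuel + 1, v :: q, stops =>
    let r := loadA (v :: q) X Y
    outerA X Y fuel r.2 (stops + runsA r.1 + 1)

-- the queue-building while loop appends (A[i], B[i]) for i < len(A); with
-- len(A) ≤ len(B) (Pre_solution; otherwise Python raises IndexError) this is zip
def solution (A : List Int) (B : List Int) (M : Int) (X : Int) (Y : Int) : Int :=
  outerA X Y A.length (List.zip A B) 0

-- ===== PORT B =====

-- B's single loading pass: counts a stop whenever the loaded person's floor starts
-- a new run (loaded_any/prev_floor); returns (stops accumulated, remaining queue)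
def loadB : List (Int × Int) → Int → Int → Bool → Int → Int → Int × List (Int × Int)
  | [], _, _, _, _, s => (s, [])
  | v :: q, people, weight, loadedAny, prevFloor, s =>
    if people = 0 ∨ weight ≤ 0 then (s, v :: q)
    else
      let w' := weight - v.1
      if w' < 0 then (s, v :: q)
      else
        let s' := if loadedAny = false ∨ v.2 ≠ prevFloor then s + 1 else s
        loadB q (people - 1) w' true v.2 s'

def outerB (X Y : Int) : Nat → List (Int × Int) → Int → Int
  | _, [], stops => stops
  | 0, _ :: _, stops => stops
  | fuel + 1, v :: q, stops =>
    let r := loadB (v :: q) X Y false 0 0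
    outerB X Y fuel r.2 (stops + r.1 + 1)

def solution_alt (A : List Int) (B : List Int) (M : Int) (X : Int) (Y : Int) : Int :=
  outerB X Y A.length (List.zip A B) 0

-- ===== PRECONDITION & SPEC =====
-- Pre_ excludes exactly the inputs where Python A does not return: len(A) > len(B)
-- raises IndexError while building the queue, and the outer loop diverges iff the
-- queue is nonempty and a batch loads nobody (X = 0, Y ≤ 0, or some weight > Y,
-- which eventually reaches the queue front).
def Pre_solution (A : List Int) (B : List Int) (M : Int) (X : Int) (Y : Int) : Prop :=
  A.length ≤ B.length ∧ (A = [] ∨ (X ≠ 0 ∧ 0 < Y ∧ ∀ w ∈ A, w ≤ Y))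
instance (A : List Int) (B : List Int) (M : Int) (X : Int) (Y : Int) : Decidable (Pre_solution A B M X Y) := by unfold Pre_solution; infer_instance

def pvWitness_solution : List Int × List Int × Int × Int × Int := ([60, 80, 40], [2, 3, 5], 5, 2, 200)

def Spec_solution (A : List Int) (B : List Int) (M : Int) (X : Int) (Y : Int) (out : Int) : Prop := out = solution_alt A B M X Y
instance (A : List Int) (B : List Int) (M : Int) (X : Int) (Y : Int) (out : Int) : Decidable (Spec_solution A B M X Y out) := by unfold Spec_solution; infer_instance

-- ===== CLAIM =====
def Claim_equal_solution : Prop := ∀ (A : List Int) (B : List Int) (M : Int) (X : Int) (Y : Int), Dom_solution A B M X Y → Pre_solution A B M X Y → Spec_solution A B M X Y (solution A B M X Y)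

-- ===== LEMMAS AND PROOFS =====

-- B's on-the-fly run counter agrees with A's build-then-scan counter.
theorem loadB_eq (q : List (Int × Int)) : ∀ (p w prev s : Int) (any : Bool),
    loadB q p w any prev s =
      (s + (if any then runsA (skipSameA prev (loadA q p w).1) else runsA (loadA q p w).1),
       (loadA q p w).2) := by
  induction q with
  | nil =>
    intro p w prev s any
    simp [loadB, loadA, runsA, skipSameA]
  | cons v q ih =>
    intro p w prev s any
    simp only [loadB, loadA]
    by_cases h1 : p = 0 ∨ w ≤ 0
    · simp [h1, runsA, skipSameA]
    · simp only [h1, if_false]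
      by_cases h2 : w - v.1 < 0
      · simp [h2, runsA, skipSameA]
      · simp only [h2, if_false]
        rw [ih]
        cases any with
        | false =>
          simp only [Bool.false_eq_true, if_false, true_or, if_true]
          rw [runsA]
          ring_nf
        | true =>
          by_cases h3 : v.2 = prev
          · simp [skipSameA, h3]
          · simp only [Bool.true_eq_false, false_or, h3, ne_eq, not_false_eq_true,
              if_true, skipSameA, if_false]
            rw [runsA]
            ring_nf

theorem outerB_eq (X Y : Int) : ∀ (fuel : Nat) (q : List (Int × Int)) (s : Int),
    outerB X Y fuel q s = outerA X Y fuel q s := by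
  intro fuel
  induction fuel with
  | zero =>
    intro q s
    cases q <;> simp [outerA, outerB]
  | succ f ih =>
    intro q s
    cases q with
    | nil => simp [outerA, outerB]
    | cons v q =>
      simp only [outerA, outerB]
      rw [loadB_eq]
      simp only [if_neg (by simp : ¬ (false : Bool) = true)]
      rw [ih]
      ring_nf

-- ===== VERDICT =====
theorem solution_spec : Claim_equal_solution := by
  intro A B M X Y _ _
  unfold Spec_solution solution solution_alt
  rw [outerB_eq]
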